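-- pv_equiv track=rewrite | github.com/becelli/real-networking | ipv4-calculator/calculator_lib.py | get_last_host_binaddr
-- ===== SOURCE A (Python) =====
-- def get_last_host_binaddr(broadcast_bin, network_bin):
--     """Calcula o endereço binário do último host"""
--     # Se não há endereço de rede ou de broadcast, não há último host
--     if not (broadcast_bin and network_bin):
--         return None
--     # Se o endereço de broadcast é igual ao de rede, não há último host
--     if broadcast_bin == "0" * 32 or broadcast_bin == network_bin:
--         return None
--
--     last_bin = None
--     broadcast_bin = broadcast_bin[:]  # Cópia para não alterar o endereço de broadcast.
--     """
--     i. Para cada bit, da direita para a esquerda, se o bit é 0,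
--     substitua por 1.
--     ii. Se o bit for 1, substitua por 0 e saia do loop.
--
--     Realiza a mesma lógica do primeiro host, porém, diminuindo o endereço de broadcast.
--     """
--     for i, bit in enumerate(broadcast_bin[::-1]):
--         if bit == "1":
--             last_bin = broadcast_bin[: 32 - i - 1] + "0" + broadcast_bin[32 - i :]
--             break
--         else:
--             broadcast_bin = broadcast_bin[: 32 - i - 1] + "1" + broadcast_bin[32 - i :]
--
--     # Verificações em que não há último host ou anularia o endereço de rede.
--     if last_bin == "0.0.0.0" or network_bin == broadcast_bin or last_bin == network_bin:
--         return None
--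
--     return last_bin
-- ===== SOURCE B (Python) =====
-- def _from_bin(s):
--     n = 0
--     for c in s:
--         n = 2 * n + (1 if c == "1" else 0)
--     return n
--
--
-- def _to_bin32(n):
--     bits = []
--     for _ in range(32):
--         bits.append("1" if n % 2 else "0")
--         n //= 2
--     return "".join(reversed(bits))
--
--
-- def get_last_host_binaddr(broadcast_bin, network_bin):
--     """Last host = broadcast - 1, computed arithmetically instead of by string
--     surgery; the network is compared against bc | (bc - 1) (the broadcast with
--     its trailing zero-run filled with ones), as the original function does."""
--     if not (broadcast_bin and network_bin):
--         return None
--     bc = _from_bin(broadcast_bin)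
--     if bc == 0 or broadcast_bin == network_bin:
--         return None
--     last_bin = _to_bin32(bc - 1)
--     mutated_bin = _to_bin32(bc | (bc - 1))
--     if network_bin == mutated_bin or last_bin == network_bin:
--         return None
--     return last_bin
-- ===== Notes on version B (the rewrite author's own statement) =====
-- stated objective: faster
-- what changed: B replaces A's right-to-left string-surgery loop (slicing the broadcast string bit by bit) by integer arithmetic: parse the broadcast to an int bc, take last = bc - 1 and the trailing-zero-filled broadcast bc | (bc - 1), and format both back to 32 bits; the dead '0.0.0.0' check is dropped.
-- outside the precondition, e.g. on get_last_host_binaddr('111', 'abc'): A returns '1110', B returns '00000000000000000000000000000110'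
import Mathlib
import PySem

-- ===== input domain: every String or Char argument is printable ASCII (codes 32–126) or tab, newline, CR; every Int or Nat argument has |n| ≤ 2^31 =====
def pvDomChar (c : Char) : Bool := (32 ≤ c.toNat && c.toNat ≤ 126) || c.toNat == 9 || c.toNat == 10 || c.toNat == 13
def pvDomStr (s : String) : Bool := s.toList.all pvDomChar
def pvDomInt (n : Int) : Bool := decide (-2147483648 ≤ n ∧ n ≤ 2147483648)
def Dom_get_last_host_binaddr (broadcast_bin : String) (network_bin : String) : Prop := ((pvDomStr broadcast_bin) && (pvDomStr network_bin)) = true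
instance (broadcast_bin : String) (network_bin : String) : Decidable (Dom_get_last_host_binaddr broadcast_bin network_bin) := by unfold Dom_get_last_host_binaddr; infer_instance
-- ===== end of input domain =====

-- B computes the last host arithmetically (parse, subtract 1, format; mutated broadcast as
-- bc | (bc-1)) instead of A's right-to-left string-slicing loop; same return value on Pre_.

-- ===== PORT A =====
-- the for-loop over enumerate(broadcast_bin[::-1]) with break: the iterated list is the
-- reversed SNAPSHOT of broadcast_bin, i the enumerate counter, b the evolving broadcast copy;
-- result = (last_bin, final broadcast_bin)
def aLoop : List Char → Int → List Char → Option (List Char) × List Char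
  | [], _, b => (none, b)
  | c :: rest, i, b =>
    if c = '1' then
      (some (PySem.List.slice b none (some (32 - i - 1)) ++ '0' :: PySem.List.slice b (some (32 - i)) none), b)
    else
      aLoop rest (i + 1) (PySem.List.slice b none (some (32 - i - 1)) ++ '1' :: PySem.List.slice b (some (32 - i)) none)

def get_last_host_binaddr (broadcast_bin : String) (network_bin : String) : Option String :=
  -- if not (broadcast_bin and network_bin): the falsy strings are exactly the empty ones
  if broadcast_bin.toList = [] ∨ network_bin.toList = [] then none
  -- "0" * 32 is the list of 32 '0' characters
  else if broadcast_bin.toList = List.replicate 32 '0' ∨ broadcast_bin.toList = network_bin.toList then none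
  -- the loop's (last_bin, broadcast_bin) result, written inline
  else if (aLoop broadcast_bin.toList.reverse 0 broadcast_bin.toList).1 = some ("0.0.0.0".toList) ∨
      network_bin.toList = (aLoop broadcast_bin.toList.reverse 0 broadcast_bin.toList).2 ∨
      (aLoop broadcast_bin.toList.reverse 0 broadcast_bin.toList).1 = some network_bin.toList then none
  else (aLoop broadcast_bin.toList.reverse 0 broadcast_bin.toList).1.map (fun l => String.ofList l)

-- ===== PORT B =====
-- _from_bin: n = 0; for c in s: n = 2*n + (1 if c == "1" else 0)
def fromBin (cs : List Char) : Int :=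
  cs.foldl (fun n c => 2 * n + (if c = '1' then 1 else 0)) 0

-- _to_bin32's loop, LSB first (bits.append("1" if n % 2 else "0"); n //= 2), run 32 times
def toBits : Nat → Int → List Char
  | 0, _ => []
  | f + 1, n => (if PySem.Int.mod n 2 ≠ 0 then '1' else '0') :: toBits f (PySem.Int.floordiv n 2)

-- "".join(reversed(bits))
def toBin32 (n : Int) : List Char := (toBits 32 n).reverse

def get_last_host_binaddr_alt (broadcast_bin : String) (network_bin : String) : Option String :=
  if broadcast_bin.toList = [] ∨ network_bin.toList = [] then none
  -- bc, last_bin = _to_bin32(bc - 1) and mutated_bin = _to_bin32(bc | (bc - 1)) written inline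
  else if fromBin broadcast_bin.toList = 0 ∨ broadcast_bin.toList = network_bin.toList then none
  else if network_bin.toList = toBin32 (PySem.Int.bor (fromBin broadcast_bin.toList) (fromBin broadcast_bin.toList - 1)) ∨
      toBin32 (fromBin broadcast_bin.toList - 1) = network_bin.toList then none
  else some (String.ofList (toBin32 (fromBin broadcast_bin.toList - 1)))

-- ===== PRECONDITION & SPEC =====
-- Pre_ excludes only broadcasts that contain a '1' yet are not 32-character binary strings,
-- outside the function's natural domain: there A's slice surgery on the malformed address and
-- B's arithmetic return different values (see claim cites); everywhere else (32-bit binary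
-- broadcasts, and any broadcast without a '1', where both return None) the claim applies.
def Pre_get_last_host_binaddr (broadcast_bin : String) (network_bin : String) : Prop :=
  (broadcast_bin.toList.length = 32 ∧ broadcast_bin.toList.all (fun c => c == '0' || c == '1') = true)
  ∨ '1' ∉ broadcast_bin.toList ∨ broadcast_bin.toList = [] ∨ network_bin.toList = []
  ∨ broadcast_bin.toList = network_bin.toList
instance (broadcast_bin : String) (network_bin : String) : Decidable (Pre_get_last_host_binaddr broadcast_bin network_bin) := by unfold Pre_get_last_host_binaddr; infer_instance

def pvWitness_get_last_host_binaddr : String × String :=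
  ("00000000000000000000000000000001", "00000000000000000000000000000000")

def Spec_get_last_host_binaddr (broadcast_bin : String) (network_bin : String) (out : Option String) : Prop := out = get_last_host_binaddr_alt broadcast_bin network_bin
instance (broadcast_bin : String) (network_bin : String) (out : Option String) : Decidable (Spec_get_last_host_binaddr broadcast_bin network_bin out) := by unfold Spec_get_last_host_binaddr; infer_instance

-- ===== CLAIM =====
def Claim_equal_get_last_host_binaddr : Prop := ∀ (broadcast_bin : String) (network_bin : String), Dom_get_last_host_binaddr broadcast_bin network_bin → Pre_get_last_host_binaddr broadcast_bin network_bin → Spec_get_last_host_binaddr broadcast_bin network_bin (get_last_host_binaddr broadcast_bin network_bin)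

-- ===== LEMMAS AND PROOFS =====

-- slice arithmetic: for i ≤ 31, the two slices are take (31-i) and drop (32-i)
theorem slice_pair_eq (b : List Char) (i : Nat) (hi : i ≤ 31) (c : Char) :
    PySem.List.slice b none (some (32 - (i : Int) - 1)) ++ c :: PySem.List.slice b (some (32 - (i : Int))) none
      = b.take (31 - i) ++ c :: b.drop (32 - i) := by
  have h1 : (32 - (i : Int) - 1) = ((31 - i : Nat) : Int) := by omega
  have h2 : (32 - (i : Int)) = ((32 - i : Nat) : Int) := by omega
  rw [h1, h2, PySem.List.slice_to_natCast, PySem.List.slice_from_natCast]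

-- the loop invariant: after i steps the last i characters are '1'; at the first '1' of the
-- reversed snapshot it emits last_bin and stops
theorem aLoop_run : ∀ (k i : Nat) (tail front : List Char),
    front.length = 31 - (i + k) → i + k ≤ 31 →
    aLoop (List.replicate k '0' ++ '1' :: tail) (i : Int) (front ++ '1' :: (List.replicate k '0' ++ List.replicate i '1'))
      = (some (front ++ '0' :: List.replicate (k + i) '1'), front ++ '1' :: List.replicate (k + i) '1') := by
  intro k
  induction k with
  | zero =>
    intro i tail front hf hik
    simp only [List.replicate, List.nil_append, aLoop]
    rw [slice_pair_eq _ i (by omega), slice_pair_eq _ i (by omega)]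
    have hfront : (front ++ '1' :: List.replicate i '1').take (31 - i) = front := by
      have : 31 - i = front.length := by omega
      rw [this, List.take_left]
    have hdrop : (front ++ '1' :: List.replicate i '1').drop (32 - i) = List.replicate i '1' := by
      have h : front ++ '1' :: List.replicate i '1' = (front ++ ['1']) ++ List.replicate i '1' := by simp
      have : 32 - i = (front ++ ['1']).length := by simp; omega
      rw [h, this, List.drop_left]
    simp [hfront, hdrop]
  | succ k ih =>
    intro i tail front hf hik
    have hrep : List.replicate (k+1) '0' ++ '1' :: tail = '0' :: (List.replicate k '0' ++ '1' :: tail) := by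
      simp [List.replicate_succ]
    rw [hrep]
    simp only [aLoop, if_neg (by decide : ¬ ('0' = '1'))]
    rw [slice_pair_eq _ i (by omega)]
    have hb : front ++ '1' :: (List.replicate (k+1) '0' ++ List.replicate i '1')
        = ((front ++ '1' :: List.replicate k '0') ++ ['0']) ++ List.replicate i '1' := by
      simp [List.replicate_succ']
    have htake : ((front ++ '1' :: (List.replicate (k+1) '0' ++ List.replicate i '1'))).take (31 - i)
        = front ++ '1' :: List.replicate k '0' := by
      rw [hb]
      rw [List.take_append_of_le_length (by simp; omega)]
      have : 31 - i = (front ++ '1' :: List.replicate k '0').length := by simp; omega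
      rw [this, List.take_left]
    have hdrop : ((front ++ '1' :: (List.replicate (k+1) '0' ++ List.replicate i '1'))).drop (32 - i)
        = List.replicate i '1' := by
      rw [hb]
      have : 32 - i = ((front ++ '1' :: List.replicate k '0') ++ ['0']).length := by simp; omega
      rw [this, List.drop_left]
    rw [htake, hdrop]
    have hcast : (i : Int) + 1 = ((i + 1 : Nat) : Int) := by push_cast; ring
    rw [hcast]
    have harg : (front ++ '1' :: List.replicate k '0') ++ '1' :: List.replicate i '1'
        = front ++ '1' :: (List.replicate k '0' ++ List.replicate (i+1) '1') := by
      simp [List.replicate_succ]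
    rw [harg, ih (i+1) tail front (by omega) (by omega)]
    have : k + (i + 1) = k + 1 + i := by omega
    rw [this]

def fromBinA (n : Int) (cs : List Char) : Int :=
  cs.foldl (fun n c => 2 * n + (if c = '1' then 1 else 0)) n

theorem fromBinA_append (n : Int) (xs ys : List Char) :
    fromBinA n (xs ++ ys) = fromBinA (fromBinA n xs) ys := List.foldl_append ..

theorem fromBinA_zeros (n : Int) (k : Nat) : fromBinA n (List.replicate k '0') = n * 2 ^ k := by
  induction k generalizing n with
  | zero => simp [fromBinA]
  | succ k ih =>
    rw [List.replicate_succ]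
    show fromBinA (2 * n + 0) (List.replicate k '0') = _
    rw [ih]; ring

theorem fromBinA_ones (n : Int) (k : Nat) : fromBinA n (List.replicate k '1') = n * 2 ^ k + 2 ^ k - 1 := by
  induction k generalizing n with
  | zero => simp [fromBinA]
  | succ k ih =>
    rw [List.replicate_succ]
    show fromBinA (2 * n + 1) (List.replicate k '1') = _
    rw [ih]; ring

theorem fromBinA_nonneg (n : Int) (cs : List Char) (hn : 0 ≤ n) : 0 ≤ fromBinA n cs := by
  induction cs generalizing n with
  | nil => simpa [fromBinA]
  | cons c r ih =>
    show 0 ≤ fromBinA (2 * n + _) r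
    exact ih _ (by split <;> omega)

-- roundtrip of B's formatter against B's parser on binary lists
theorem toBits_fromBinA (t : List Char) (hbin : ∀ c ∈ t, c = '0' ∨ c = '1') :
    toBits t.length (fromBinA 0 t) = t.reverse := by
  induction t using List.reverseRecOn with
  | nil => simp [toBits]
  | append_singleton t' c ih =>
    have hbin' : ∀ x ∈ t', x = '0' ∨ x = '1' := fun x hx => hbin x (by simp [hx])
    have hc : c = '0' ∨ c = '1' := hbin c (by simp)
    have hV : 0 ≤ fromBinA 0 t' := fromBinA_nonneg 0 t' le_rfl
    have hval : fromBinA 0 (t' ++ [c]) = 2 * fromBinA 0 t' + (if c = '1' then 1 else 0) := by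
      rw [fromBinA_append]; rfl
    have hlen : (t' ++ [c]).length = t'.length + 1 := by simp
    rw [hlen, hval]
    set V := fromBinA 0 t' with hVdef
    set b : Int := if c = '1' then 1 else 0 with hb
    have hb01 : b = 0 ∨ b = 1 := by rw [hb]; split <;> simp
    have hmod : PySem.Int.mod (2 * V + b) 2 = b := by
      rw [PySem.Int.mod_eq_emod_of_pos (by norm_num)]; omega
    have hdiv : PySem.Int.floordiv (2 * V + b) 2 = V := by
      rw [PySem.Int.floordiv_eq_ediv_of_pos (by norm_num)]; omega
    show (if PySem.Int.mod (2*V+b) 2 ≠ 0 then '1' else '0') :: toBits t'.length (PySem.Int.floordiv (2*V+b) 2) = (t' ++ [c]).reverse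
    rw [hmod, hdiv, ih hbin']
    rcases hc with h | h <;> simp [h, hb]

-- decomposition of a binary list containing a '1' at its trailing '1'
theorem bin_decomp (cs : List Char) (hbin : ∀ c ∈ cs, c = '0' ∨ c = '1') (h1 : '1' ∈ cs) :
    ∃ p k, cs = p ++ '1' :: List.replicate k '0' ∧ ∀ c ∈ p, c = '0' ∨ c = '1' := by
  induction cs using List.reverseRecOn with
  | nil => simp at h1
  | append_singleton t c ih =>
    have hbin' : ∀ x ∈ t, x = '0' ∨ x = '1' := fun x hx => hbin x (by simp [hx])
    rcases hbin c (by simp) with hc | hc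
    · have h1' : '1' ∈ t := by
        rcases List.mem_append.mp h1 with h | h
        · exact h
        · simp [hc] at h
      obtain ⟨p, k, heq, hp⟩ := ih hbin' h1'
      exact ⟨p, k + 1, by rw [heq, hc]; simp [List.replicate_succ'], hp⟩
    · exact ⟨t, 0, by simp [hc], hbin'⟩

theorem reverse_shape (p : List Char) (c : Char) (k : Nat) :
    (p ++ '1' :: List.replicate k c).reverse = List.replicate k c ++ '1' :: p.reverse := by
  simp [List.reverse_append]

theorem fromBin_shape1 (p : List Char) (k : Nat) :
    fromBin (p ++ '1' :: List.replicate k '0') = (2 * fromBinA 0 p + 1) * 2 ^ k := by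
  show fromBinA 0 (p ++ '1' :: List.replicate k '0') = _
  have : p ++ '1' :: List.replicate k '0' = (p ++ ['1']) ++ List.replicate k '0' := by simp
  rw [this, fromBinA_append, fromBinA_append, fromBinA_zeros]
  show fromBinA (2 * fromBinA 0 p + 1) [] * 2 ^ k = _
  simp [fromBinA]

theorem fromBin_shape0 (p : List Char) (k : Nat) :
    fromBin (p ++ '0' :: List.replicate k '1') = 2 * fromBinA 0 p * 2 ^ k + 2 ^ k - 1 := by
  show fromBinA 0 (p ++ '0' :: List.replicate k '1') = _
  have : p ++ '0' :: List.replicate k '1' = (p ++ ['0']) ++ List.replicate k '1' := by simp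
  rw [this, fromBinA_append, fromBinA_append, fromBinA_ones]
  show fromBinA (2 * fromBinA 0 p + 0) [] * 2 ^ k + 2 ^ k - 1 = _
  simp [fromBinA]

theorem fromBin_shape11 (p : List Char) (k : Nat) :
    fromBin (p ++ '1' :: List.replicate k '1') = (2 * fromBinA 0 p + 1) * 2 ^ k + 2 ^ k - 1 := by
  show fromBinA 0 (p ++ '1' :: List.replicate k '1') = _
  have : p ++ '1' :: List.replicate k '1' = (p ++ ['1']) ++ List.replicate k '1' := by simp
  rw [this, fromBinA_append, fromBinA_append, fromBinA_ones]
  show fromBinA (2 * fromBinA 0 p + 1) [] * 2 ^ k + 2 ^ k - 1 = _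
  simp [fromBinA]

theorem toBin32_eq (t : List Char) (hlen : t.length = 32) (hbin : ∀ c ∈ t, c = '0' ∨ c = '1') :
    toBin32 (fromBin t) = t := by
  show (toBits 32 (fromBinA 0 t)).reverse = t
  rw [← hlen, toBits_fromBinA t hbin, List.reverse_reverse]

-- the disjoint-bits identity behind bc | (bc - 1): ORing the k low ones into a number whose
-- k low bits are clear is addition
theorem lor_key (q k : Nat) :
    (2^k*(2*q+1)) ||| (2^k*(2*q) + (2^k - 1)) = 2^k*(2*q+1) + (2^k-1) := by
  have hpos : 0 < 2^k := Nat.two_pow_pos k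
  have hlt : 2^k - 1 < 2^k := Nat.sub_lt hpos one_pos
  apply Nat.eq_of_testBit_eq
  intro i
  rw [Nat.testBit_lor, Nat.testBit_two_pow_mul,
      Nat.testBit_two_pow_mul_add _ hlt i, Nat.testBit_two_pow_mul_add _ hlt i,
      Nat.testBit_two_pow_sub_one]
  by_cases h : i < k
  · simp [h, Nat.not_le.mpr h]
  · simp only [if_neg h, decide_eq_true (Nat.not_lt.mp h), Bool.true_and]
    cases hj : i - k with
    | zero => simp [Nat.testBit_zero]
    | succ j =>
      rw [Nat.testBit_add_one, Nat.testBit_add_one]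
      have h1 : 2*q/2 = q := by omega
      have h2 : (2*q+1)/2 = q := by omega
      rw [h1, h2, Bool.or_self]

theorem fromBinA_no_one (n : Int) (cs : List Char) (h : '1' ∉ cs) : fromBinA n cs = n * 2 ^ cs.length := by
  induction cs generalizing n with
  | nil => simp [fromBinA]
  | cons c r ih =>
    have hc : ¬(c = '1') := fun hc => h (by simp [hc])
    show fromBinA (2 * n + (if c = '1' then 1 else 0)) r = _
    rw [if_neg hc, ih _ (fun hm => h (by simp [hm]))]
    simp [pow_succ]; ring

theorem aLoop_no_one (cs : List Char) (h : '1' ∉ cs) : ∀ (i : Int) (b : List Char), (aLoop cs i b).1 = none := by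
  induction cs with
  | nil => intro i b; rfl
  | cons c r ih =>
    intro i b
    have hc : ¬(c = '1') := fun hc => h (by simp [hc])
    rw [aLoop, if_neg hc]
    exact ih (fun hm => h (by simp [hm])) _ _

-- shared setup for the main branch: the decomposition of the broadcast, both ports'
-- last-host strings and mutated-broadcast strings
theorem setup_facts (p : List Char) (k : Nat) (hlen' : p.length + 1 + k = 32) (hp : ∀ c ∈ p, c = '0' ∨ c = '1') :
    toBin32 (fromBin (p ++ '1' :: List.replicate k '0') - 1) = p ++ '0' :: List.replicate k '1' ∧
    toBin32 (PySem.Int.bor (fromBin (p ++ '1' :: List.replicate k '0'))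
        (fromBin (p ++ '1' :: List.replicate k '0') - 1)) = p ++ '1' :: List.replicate k '1' ∧
    aLoop (p ++ '1' :: List.replicate k '0').reverse 0 (p ++ '1' :: List.replicate k '0')
      = (some (p ++ '0' :: List.replicate k '1'), p ++ '1' :: List.replicate k '1') := by
  have hLlen : (p ++ '0' :: List.replicate k '1').length = 32 := by simp; omega
  have hLbin : ∀ c ∈ p ++ '0' :: List.replicate k '1', c = '0' ∨ c = '1' := by
    intro c hc
    rcases List.mem_append.mp hc with h | h
    · exact hp c h
    · rcases List.mem_cons.mp h with h | h
      · exact Or.inl h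
      · exact Or.inr (List.eq_of_mem_replicate h)
  have hMlen : (p ++ '1' :: List.replicate k '1').length = 32 := by simp; omega
  have hMbin : ∀ c ∈ p ++ '1' :: List.replicate k '1', c = '0' ∨ c = '1' := by
    intro c hc
    rcases List.mem_append.mp hc with h | h
    · exact hp c h
    · rcases List.mem_cons.mp h with h | h
      · exact Or.inr h
      · exact Or.inr (List.eq_of_mem_replicate h)
  have hP : 0 ≤ fromBinA 0 p := fromBinA_nonneg 0 p le_rfl
  obtain ⟨q, hq⟩ : ∃ q : Nat, fromBinA 0 p = (q : Int) := ⟨(fromBinA 0 p).toNat, by omega⟩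
  have hsub : fromBin (p ++ '1' :: List.replicate k '0') - 1 = fromBin (p ++ '0' :: List.replicate k '1') := by
    rw [fromBin_shape1, fromBin_shape0]; ring
  refine ⟨by rw [hsub, toBin32_eq _ hLlen hLbin], ?_, ?_⟩
  · have hcast1 : fromBin (p ++ '1' :: List.replicate k '0') = ((2^k*(2*q+1) : Nat) : Int) := by
      rw [fromBin_shape1, hq]; push_cast; ring
    have hcast2 : fromBin (p ++ '1' :: List.replicate k '0') - 1 = ((2^k*(2*q) + (2^k - 1) : Nat) : Int) := by
      rw [fromBin_shape1, hq]
      have h1 : (1:Nat) ≤ 2^k := Nat.one_le_two_pow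
      push_cast [h1]
      ring
    rw [hcast2, hcast1, PySem.Int.bor_natCast, lor_key]
    have : ((2^k*(2*q+1) + (2^k-1) : Nat) : Int) = fromBin (p ++ '1' :: List.replicate k '1') := by
      rw [fromBin_shape11, hq]
      have h1 : (1:Nat) ≤ 2^k := Nat.one_le_two_pow
      push_cast [h1]
      ring
    rw [this, toBin32_eq _ hMlen hMbin]
  · rw [reverse_shape]
    have h := aLoop_run k 0 p.reverse p (by omega) (by omega)
    simpa using h

-- ===== VERDICT =====
theorem get_last_host_binaddr_spec : Claim_equal_get_last_host_binaddr := by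
  intro b n _ hPre
  show get_last_host_binaddr b n = get_last_host_binaddr_alt b n
  unfold get_last_host_binaddr get_last_host_binaddr_alt
  by_cases h0 : b.toList = [] ∨ n.toList = []
  · rw [if_pos h0, if_pos h0]
  by_cases heq : b.toList = n.toList
  · rw [if_neg h0, if_neg h0, if_pos (Or.inr heq), if_pos (Or.inr heq)]
  by_cases h1 : '1' ∈ b.toList
  case neg =>
    -- no '1': the loop never breaks (last_bin stays None) and B's parsed value is 0
    have hbc : fromBin b.toList = 0 := by
      simpa [fromBin] using fromBinA_no_one 0 b.toList h1
    have hnone : (aLoop b.toList.reverse 0 b.toList).1 = none :=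
      aLoop_no_one _ (by simpa using h1) 0 _
    rw [if_neg h0, if_neg h0, if_pos (Or.inl hbc)]
    by_cases hg2 : b.toList = List.replicate 32 '0' ∨ b.toList = n.toList
    · rw [if_pos hg2]
    · rw [if_neg hg2]
      by_cases hg3 : (aLoop b.toList.reverse 0 b.toList).1 = some ("0.0.0.0".toList) ∨
          n.toList = (aLoop b.toList.reverse 0 b.toList).2 ∨
          (aLoop b.toList.reverse 0 b.toList).1 = some n.toList
      · rw [if_pos hg3]
      · rw [if_neg hg3, hnone]
        rfl
  case pos =>
  obtain ⟨hlen, hbinB⟩ : b.toList.length = 32 ∧ b.toList.all (fun c => c == '0' || c == '1') = true := by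
    rcases hPre with h | h | h | h | h
    · exact h
    · exact absurd h1 h
    · exact absurd (Or.inl h) h0
    · exact absurd (Or.inr h) h0
    · exact absurd h heq
  have hbin : ∀ c ∈ b.toList, c = '0' ∨ c = '1' := fun c hc => by
    simpa using List.all_eq_true.mp hbinB c hc
  have hz : b.toList ≠ List.replicate 32 '0' := by
    intro h
    rw [h] at h1
    exact absurd (List.eq_of_mem_replicate h1) (by decide)
  obtain ⟨p, k, hdec, hp⟩ := bin_decomp _ hbin h1
  have hlen' : p.length + 1 + k = 32 := by
    rw [hdec] at hlen; simp at hlen; omega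
  obtain ⟨hlast, hmut, hrun⟩ := setup_facts p k hlen' hp
  rw [← hdec] at hlast hmut hrun
  have hbc0 : fromBin b.toList ≠ 0 := by
    have hP : 0 ≤ fromBinA 0 p := fromBinA_nonneg 0 p le_rfl
    have h2k : (0:Int) < 2 ^ k := by positivity
    rw [hdec, fromBin_shape1]; nlinarith
  -- the '0.0.0.0' check is dead: last_bin has 32 characters
  have hc1 : (some (p ++ '0' :: List.replicate k '1') : Option (List Char)) ≠ some ("0.0.0.0".toList) := by
    intro h
    have h' := congrArg List.length (Option.some.inj h)
    have h7 : ("0.0.0.0".toList).length = 7 := by decide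
    rw [h7] at h'; simp at h'; omega
  rw [if_neg h0, if_neg h0,
    if_neg (show ¬(b.toList = List.replicate 32 '0' ∨ b.toList = n.toList) by tauto),
    if_neg (show ¬(fromBin b.toList = 0 ∨ b.toList = n.toList) by tauto)]
  simp only [hrun, hlast, hmut]
  by_cases hcond : n.toList = p ++ '1' :: List.replicate k '1' ∨ p ++ '0' :: List.replicate k '1' = n.toList
  · rw [if_pos hcond]
    rcases hcond with h | h
    · rw [if_pos (Or.inr (Or.inl h))]
    · rw [if_pos (Or.inr (Or.inr (by rw [h])))]
  · rw [if_neg hcond, if_neg ?hA]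
    · rfl
    · rintro (h | h | h)
      · exact hc1 h
      · exact hcond (Or.inl h)
      · exact hcond (Or.inr (Option.some.inj h))
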